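-- pv_equiv track=rewrite | github.com/RVDROU/NsiClaveille | files/1_NSI/Devoirs maison/DM2/codes/1NSI_DM_2_ex4.py | mystere2
-- ===== SOURCE A (Python) =====
-- def mystere2(tab) :
--     i = 0
--     s = 0
--     c = 0
--     while tab[i] < 4 :
--         s = s+tab[i]
--         c = c + s
--         i = i + 1
--     return (s,c)
-- ===== SOURCE B (Python) =====
-- def mystere2(tab):
--     prefix = []
--     for x in tab:
--         if x >= 4:
--             break
--         prefix.append(x)
--     m = len(prefix)
--     s = sum(prefix)
--     c = sum(x * (m - i) for i, x in enumerate(prefix))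
--     return (s, c)
-- ===== Notes on version B (the rewrite author's own statement) =====
-- stated objective: alternative
-- what changed: A fuses everything into one while loop carrying two running accumulators with a raw index guard; B extracts the stopping prefix once, sums it with sum(), and computes the cumulative total by the closed-form weighted sum sum(x*(m-i)) over enumerate(prefix), eliminating the running-sum accumulator (exact because the elements are ints).
import Mathlib
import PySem

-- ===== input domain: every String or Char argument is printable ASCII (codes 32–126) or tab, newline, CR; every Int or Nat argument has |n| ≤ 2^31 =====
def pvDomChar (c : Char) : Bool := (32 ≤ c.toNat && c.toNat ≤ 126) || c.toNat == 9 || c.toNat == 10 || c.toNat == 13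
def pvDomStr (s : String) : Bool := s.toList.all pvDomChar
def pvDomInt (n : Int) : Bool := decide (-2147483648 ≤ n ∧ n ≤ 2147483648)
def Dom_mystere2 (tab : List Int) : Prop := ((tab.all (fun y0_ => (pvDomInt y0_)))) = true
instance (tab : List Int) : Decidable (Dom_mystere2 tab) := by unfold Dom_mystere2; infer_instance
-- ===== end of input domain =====

-- B replaces A's fused index-guarded while loop (two running accumulators) by prefix
-- extraction plus sum() and a closed-form weighted sum; exact on Int, no speed claim.

-- ===== PORT A =====
-- A's while loop: tab[i] is consumed left to right while < 4; s accumulates the sum,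
-- c the running cumulative sum. When the list is exhausted Python raises IndexError
-- (excluded by Pre_mystere2); the port returns the current (s, c) there.
def mystere2Go : List Int → Int → Int → Int × Int
  | [], s, c => (s, c)                 -- Python: IndexError here (outside Pre_)
  | x :: rest, s, c =>
      if x < 4 then mystere2Go rest (s + x) (c + (s + x)) else (s, c)

def mystere2 (tab : List Int) : Int × Int := mystere2Go tab 0 0

-- ===== PORT B =====
def mystere2_alt (tab : List Int) : Int × Int :=
  let pre := tab.takeWhile (fun x => decide (x < 4))   -- for x in tab: break on x >= 4
  let m : Int := pre.length
  let s := pre.foldl (· + ·) 0                          -- sum(prefix)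
  let c := (PySem.List.enumerate pre).foldl (fun c q => c + q.2 * (m - q.1)) 0
  (s, c)

-- ===== PRECONDITION & SPEC =====
-- Pre_ excludes exactly the inputs where A raises IndexError: lists whose elements are
-- all < 4 (including the empty list); there B returns the sum and cumulative sum of the
-- whole list instead of raising.
def Pre_mystere2 (tab : List Int) : Prop := ∃ x ∈ tab, 4 ≤ x
instance (tab : List Int) : Decidable (Pre_mystere2 tab) := by unfold Pre_mystere2; infer_instance
def pvWitness_mystere2 : List Int := [1, 5]

def Spec_mystere2 (tab : List Int) (out : Int × Int) : Prop := out = mystere2_alt tab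
instance (tab : List Int) (out : Int × Int) : Decidable (Spec_mystere2 tab out) := by unfold Spec_mystere2; infer_instance

-- ===== CLAIM (what is proved, stated in full; the proofs are below) =====
def Claim_equal_mystere2 : Prop := ∀ (tab : List Int), Dom_mystere2 tab → Pre_mystere2 tab → Spec_mystere2 tab (mystere2 tab)

-- ===== LEMMAS AND PROOFS =====

-- cumulative-sum of the prefix, recursively: each element is counted once for itself
-- and once for every later element of the prefix.
def cumW : List Int → Int
  | [] => 0
  | x :: p => x * ((p.length : Int) + 1) + cumW p

lemma foldl_add_eq (p : List Int) : ∀ a : Int, p.foldl (· + ·) a = a + p.sum := by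
  induction p with
  | nil => simp
  | cons x p ih => intro a; simp [List.foldl_cons, ih, List.sum_cons]; ring

lemma enumFold_eq (p : List Int) : ∀ (k a m : Int), m = k + p.length →
    (PySem.List.enumerate p k).foldl (fun c q => c + q.2 * (m - q.1)) a = a + cumW p := by
  induction p with
  | nil => intro k a m _; simp [PySem.List.enumerate_nil, cumW]
  | cons x p ih =>
    intro k a m hm
    rw [PySem.List.enumerate_cons, List.foldl_cons, ih (k + 1) _ m (by simp at hm ⊢; omega)]
    simp [cumW]
    have : m - k = (p.length : Int) + 1 := by simp at hm; omega
    rw [this]; ring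

lemma go_eq (tab : List Int) : ∀ s c : Int,
    mystere2Go tab s c =
      (s + (tab.takeWhile (fun x => decide (x < 4))).sum,
       c + s * ((tab.takeWhile (fun x => decide (x < 4))).length : Int)
         + cumW (tab.takeWhile (fun x => decide (x < 4)))) := by
  induction tab with
  | nil => intro s c; simp [mystere2Go, cumW]
  | cons x rest ih =>
    intro s c
    by_cases hx : x < 4
    · rw [show mystere2Go (x :: rest) s c = mystere2Go rest (s + x) (c + (s + x)) by
        simp [mystere2Go, hx], ih]
      simp [hx, cumW]
      constructor
      · ring
      · ring
    · simp [mystere2Go, hx, cumW]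

theorem mystere2_eq_alt (tab : List Int) : mystere2 tab = mystere2_alt tab := by
  have h1 := foldl_add_eq (tab.takeWhile (fun x => decide (x < 4))) 0
  have h2 := enumFold_eq (tab.takeWhile (fun x => decide (x < 4))) 0 0
    ((tab.takeWhile (fun x => decide (x < 4))).length : Int) (by simp)
  simp [mystere2, mystere2_alt, go_eq, h1, h2]

-- ===== VERDICT (by name: the statement is the Claim_ definition above) =====
theorem mystere2_spec : Claim_equal_mystere2 := by
  intro tab _ _
  unfold Spec_mystere2
  exact mystere2_eq_alt tab
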